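-- pv_equiv track=rewrite | github.com/monosabbath/wordlist-generation-public | wordlist_generation/inference/generation.py | normalize_max_new_tokens
-- ===== SOURCE A (Python) =====
-- from typing import Any, Dict, Optional
--
-- def normalize_max_new_tokens(requested: Optional[int], allowed: Optional[tuple[int, ...]]) -> int:
--     # Use the configured allowed set to determine the cap; fall back to 512 if not provided.
--     if not allowed or len(allowed) == 0:
--         cap = 512
--         target = int(requested) if requested is not None else cap
--         return min(target, cap)
--     # allowed is sorted in Settings; use its max as cap
--     cap = allowed[-1]
--     target = int(requested) if requested is not None else cap
--     target = min(target, cap)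
--     for a in allowed:
--         if target <= a:
--             return a
--     return allowed[-1]
-- ===== SOURCE B (Python) =====
-- def normalize_max_new_tokens(requested, allowed):
--     cap = allowed[-1] if allowed else 512
--     target = min(int(requested) if requested is not None else cap, cap)
--     if not allowed:
--         return target
--     snapped = allowed[-1]
--     for a in reversed(allowed):
--         if a >= target:
--             snapped = a
--     return snapped
-- ===== Notes on version B (the rewrite author's own statement) =====
-- stated objective: alternative
-- what changed: Replaces A's two separate guard branches and forward early-return scan with a single uniform cap/target computation followed by a backward accumulator fold over reversed(allowed) (last update wins = first match from the front), with no early returns.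
import Mathlib
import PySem

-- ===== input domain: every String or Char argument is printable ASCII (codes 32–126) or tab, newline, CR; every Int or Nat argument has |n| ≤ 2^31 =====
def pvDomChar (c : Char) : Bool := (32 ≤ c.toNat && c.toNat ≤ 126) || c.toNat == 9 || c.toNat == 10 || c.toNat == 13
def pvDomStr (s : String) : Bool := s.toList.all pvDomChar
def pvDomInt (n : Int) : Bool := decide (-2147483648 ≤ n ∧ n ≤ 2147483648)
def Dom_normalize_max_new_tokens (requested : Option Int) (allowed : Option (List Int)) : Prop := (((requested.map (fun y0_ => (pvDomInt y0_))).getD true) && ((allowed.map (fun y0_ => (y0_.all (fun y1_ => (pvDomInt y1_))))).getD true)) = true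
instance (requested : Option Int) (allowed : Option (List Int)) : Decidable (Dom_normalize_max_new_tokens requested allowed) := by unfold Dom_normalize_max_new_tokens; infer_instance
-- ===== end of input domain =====

-- B replaces A's two guard branches and forward early-return scan with a single cap/target
-- computation and a backward accumulator fold (objective: alternative, same cost).


-- ===== PORT A =====
-- A's trailing loop: first a with target ≤ a, early return; falls through to allowed[-1] (= last).
def pvScanA (target last : Int) : List Int → Int
  | [] => last
  | a :: rest => if target ≤ a then a else pvScanA target last rest

def normalize_max_new_tokens (requested : Option Int) (allowed : Option (List Int)) : Int :=
  match allowed with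
  | none =>
      let cap : Int := 512
      let target := match requested with | some r => r | none => cap
      min target cap
  | some [] =>
      let cap : Int := 512
      let target := match requested with | some r => r | none => cap
      min target cap
  | some (x :: xs) =>
      let cap := (x :: xs).getLast!
      let target := match requested with | some r => r | none => cap
      let target := min target cap
      pvScanA target cap (x :: xs)

-- ===== PORT B =====
def normalize_max_new_tokens_alt (requested : Option Int) (allowed : Option (List Int)) : Int :=
  let cap : Int := match allowed with | some (x :: xs) => (x :: xs).getLast! | _ => 512
  let target := min (match requested with | some r => r | none => cap) cap
  match allowed with
  | some (x :: xs) =>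
      ((x :: xs).reverse).foldl (fun acc a => if a ≥ target then a else acc) ((x :: xs).getLast!)
  | _ => target

-- ===== PRECONDITION & SPEC =====
def Spec_normalize_max_new_tokens (requested : Option Int) (allowed : Option (List Int)) (out : Int) : Prop := out = normalize_max_new_tokens_alt requested allowed
instance (requested : Option Int) (allowed : Option (List Int)) (out : Int) : Decidable (Spec_normalize_max_new_tokens requested allowed out) := by unfold Spec_normalize_max_new_tokens; infer_instance

-- ===== CLAIM (what is proved, stated in full; the proofs are below) =====
def Claim_equal_normalize_max_new_tokens : Prop := ∀ (requested : Option Int) (allowed : Option (List Int)), Dom_normalize_max_new_tokens requested allowed → Spec_normalize_max_new_tokens requested allowed (normalize_max_new_tokens requested allowed)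

-- ===== LEMMAS AND PROOFS =====
-- The backward fold (last update wins) equals the forward early-return scan.
theorem foldl_reverse_eq_scanA (t last : Int) (l : List Int) :
    (l.reverse).foldl (fun acc a => if a ≥ t then a else acc) last = pvScanA t last l := by
  induction l with
  | nil => rfl
  | cons a rest ih =>
      simp only [List.reverse_cons, List.foldl_append, List.foldl_cons, List.foldl_nil, ih,
        pvScanA, ge_iff_le]

-- ===== VERDICT (by name: the statement is the Claim_ definition above) =====
theorem normalize_max_new_tokens_spec : Claim_equal_normalize_max_new_tokens := by
  intro requested allowed _
  unfold Spec_normalize_max_new_tokens normalize_max_new_tokens normalize_max_new_tokens_alt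
  match allowed with
  | none => rfl
  | some [] => rfl
  | some (x :: xs) => simp only [foldl_reverse_eq_scanA]
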